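-- pv_equiv track=rewrite | github.com/Dheraj07/DAA | DAA_WEEK6/inLab/ThievesCaught.py | max_thieves_caught
-- ===== SOURCE A (Python) =====
-- def max_thieves_caught(arr, k):
--     police = []
--     thieves = []
--
--     for i in range(len(arr)):
--         if arr[i] == 'P':
--             police.append(i)
--         else:
--             thieves.append(i)
--
--     i, j, count = 0, 0, 0
--
--     while i < len(police) and j < len(thieves):
--         if abs(police[i] - thieves[j]) <= k:
--             count += 1
--             i += 1
--             j += 1
--         elif police[i] < thieves[j]:
--             i += 1
--         else:
--             j += 1
--
--     return count
-- ===== SOURCE B (Python) =====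
-- def max_thieves_caught(arr, k):
--     # Single fused pass: sliding-window matching with queues of unmatched indices.
--     qp, qt = [], []   # unmatched police / thief indices (FIFO)
--     hp, ht = 0, 0     # head pointers into qp / qt
--     count = 0
--     for i, c in enumerate(arr):
--         if c == 'P':
--             while ht < len(qt) and i - qt[ht] > k:
--                 ht += 1
--             if ht < len(qt):
--                 ht += 1
--                 count += 1
--             else:
--                 qp.append(i)
--         else:
--             while hp < len(qp) and i - qp[hp] > k:
--                 hp += 1
--             if hp < len(qp):
--                 hp += 1
--                 count += 1
--             else:
--                 qt.append(i)
--     return count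
-- ===== Notes on version B (the rewrite author's own statement) =====
-- stated objective: alternative
-- what changed: Replaces A's two phases (partition into police/thieves index lists, then a two-pointer scan over them) by a single fused pass over arr that keeps FIFO queues of unmatched police and thief indices, pruning queue fronts farther than k and matching the current index against the opposite queue.
import Mathlib
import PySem

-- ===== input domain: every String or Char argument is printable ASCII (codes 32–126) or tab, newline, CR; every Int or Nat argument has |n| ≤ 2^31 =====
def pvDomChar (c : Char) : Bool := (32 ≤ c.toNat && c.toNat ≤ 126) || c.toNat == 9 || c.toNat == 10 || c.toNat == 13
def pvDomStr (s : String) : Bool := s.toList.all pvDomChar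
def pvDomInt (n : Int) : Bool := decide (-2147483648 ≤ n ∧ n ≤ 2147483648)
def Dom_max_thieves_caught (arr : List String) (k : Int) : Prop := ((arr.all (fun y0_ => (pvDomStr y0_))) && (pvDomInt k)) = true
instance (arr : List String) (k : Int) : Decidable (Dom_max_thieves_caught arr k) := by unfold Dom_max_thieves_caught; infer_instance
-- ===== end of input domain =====

-- B fuses A's partition + two-pointer matching into one sliding-window pass keeping
-- queues of unmatched indices (objective: alternative; same O(n) cost, different structure).

-- ===== PORT A =====
-- first for-loop of A: split indices into police / thieves (appending, as Python does)
def pvPartLoop : List String → Int → List Int × List Int → List Int × List Int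
  | [], _, acc => acc
  | s :: rest, i, (ps, ts) =>
      pvPartLoop rest (i + 1) (if s = "P" then (ps ++ [i], ts) else (ps, ts ++ [i]))

-- A's while loop: two pointers over the two lists (pointer advance = dropping the head)
def pvLoopA (k : Int) : List Int → List Int → Int → Int
  | p :: ps, t :: ts, count =>
      if |p - t| ≤ k then pvLoopA k ps ts (count + 1)
      else if p < t then pvLoopA k ps (t :: ts) count
      else pvLoopA k (p :: ps) ts count
  | _, _, count => count

def max_thieves_caught (arr : List String) (k : Int) : Int :=
  let pt := pvPartLoop arr 0 ([], [])
  pvLoopA k pt.1 pt.2 0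

-- ===== PORT B =====
-- B's inner while loop: advance the head pointer past stale indices (distance > k)
def pvPrune (k i : Int) : List Int → List Int
  | [] => []
  | x :: q => if i - x > k then pvPrune k i q else x :: q

-- B's for loop over enumerate(arr): i = current index, qp/qt = unmatched queues
def pvRunB (k : Int) : List String → Int → List Int → List Int → Int → Int
  | [], _, _, _, count => count
  | s :: rest, i, qp, qt, count =>
      if s = "P" then
        match pvPrune k i qt with
        | _ :: qt' => pvRunB k rest (i + 1) qp qt' (count + 1)
        | [] => pvRunB k rest (i + 1) (qp ++ [i]) [] count
      else
        match pvPrune k i qp with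
        | _ :: qp' => pvRunB k rest (i + 1) qp' qt (count + 1)
        | [] => pvRunB k rest (i + 1) [] (qt ++ [i]) count

def max_thieves_caught_alt (arr : List String) (k : Int) : Int :=
  pvRunB k arr 0 [] [] 0

-- ===== PRECONDITION & SPEC =====
def Spec_max_thieves_caught (arr : List String) (k : Int) (out : Int) : Prop := out = max_thieves_caught_alt arr k
instance (arr : List String) (k : Int) (out : Int) : Decidable (Spec_max_thieves_caught arr k out) := by unfold Spec_max_thieves_caught; infer_instance

-- ===== CLAIM (what is proved, stated in full; the proofs are below) =====
def Claim_equal_max_thieves_caught : Prop := ∀ (arr : List String) (k : Int), Dom_max_thieves_caught arr k → Spec_max_thieves_caught arr k (max_thieves_caught arr k)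

-- ===== LEMMAS AND PROOFS =====

-- police / thief index lists of a suffix starting at index i (spec-side helpers)
def pvPol : List String → Int → List Int
  | [], _ => []
  | s :: rest, i => if s = "P" then i :: pvPol rest (i + 1) else pvPol rest (i + 1)

def pvThv : List String → Int → List Int
  | [], _ => []
  | s :: rest, i => if s = "P" then pvThv rest (i + 1) else i :: pvThv rest (i + 1)

theorem pvPartLoop_eq (arr : List String) : ∀ (i : Int) (ps ts : List Int),
    pvPartLoop arr i (ps, ts) = (ps ++ pvPol arr i, ts ++ pvThv arr i) := by
  induction arr with
  | nil => intro i ps ts; simp [pvPartLoop, pvPol, pvThv]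
  | cons s rest ih =>
      intro i ps ts
      by_cases h : s = "P" <;> simp [pvPartLoop, pvPol, pvThv, h, ih]

theorem pvLoopA_nil_right (k : Int) (ps : List Int) (c : Int) :
    pvLoopA k ps [] c = c := by cases ps <;> simp [pvLoopA]

theorem pvLoopA_nil_left (k : Int) (ts : List Int) (c : Int) :
    pvLoopA k [] ts c = c := by cases ts <;> simp [pvLoopA]

theorem pvPrune_mem (k i : Int) : ∀ (q : List Int) (x : Int), x ∈ pvPrune k i q → x ∈ q := by
  intro q
  induction q with
  | nil => intro x h; simp [pvPrune] at h
  | cons y q ih =>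
      intro x h
      by_cases hy : i - y > k
      · simp [pvPrune, hy] at h; exact List.mem_cons_of_mem _ (ih x h)
      · simpa [pvPrune, hy] using h

-- a pending police index m against the queue of earlier unmatched thieves
theorem pvLoopA_thiefQueue (k m : Int) :
    ∀ (qt : List Int), (∀ t ∈ qt, t < m) → ∀ (fp ft : List Int) (c : Int),
    pvLoopA k (m :: fp) (qt ++ ft) c =
      (match pvPrune k m qt with
       | _ :: qt' => pvLoopA k fp (qt' ++ ft) (c + 1)
       | [] => pvLoopA k (m :: fp) ft c) := by
  intro qt
  induction qt with
  | nil => intro _ fp ft c; simp [pvPrune]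
  | cons t qt ih =>
      intro hlt fp ft c
      have htm : t < m := hlt t (List.mem_cons_self ..)
      by_cases hk : m - t > k
      · have habs : ¬ |m - t| ≤ k := by
          rw [abs_of_pos (by omega)]; omega
        have hns : ¬ m < t := by omega
        simp only [pvPrune, if_pos hk, List.cons_append, pvLoopA, if_neg habs, if_neg hns]
        exact ih (fun x hx => hlt x (List.mem_cons_of_mem _ hx)) fp ft c
      · have habs : |m - t| ≤ k := by
          rw [abs_of_pos (by omega)]; omega
        simp [pvPrune, hk, pvLoopA, habs]

-- a pending thief index m against the queue of earlier unmatched police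
theorem pvLoopA_policeQueue (k m : Int) :
    ∀ (qp : List Int), (∀ p ∈ qp, p < m) → ∀ (fp ft : List Int) (c : Int),
    pvLoopA k (qp ++ fp) (m :: ft) c =
      (match pvPrune k m qp with
       | _ :: qp' => pvLoopA k (qp' ++ fp) ft (c + 1)
       | [] => pvLoopA k fp (m :: ft) c) := by
  intro qp
  induction qp with
  | nil => intro _ fp ft c; simp [pvPrune]
  | cons p qp ih =>
      intro hlt fp ft c
      have hpm : p < m := hlt p (List.mem_cons_self ..)
      by_cases hk : m - p > k
      · have habs : ¬ |p - m| ≤ k := by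
          rw [abs_of_neg (by omega)]; omega
        have hs : p < m := hpm
        simp only [pvPrune, if_pos hk, List.cons_append, pvLoopA, if_neg habs, if_pos hs]
        exact ih (fun x hx => hlt x (List.mem_cons_of_mem _ hx)) fp ft c
      · have habs : |p - m| ≤ k := by
          rw [abs_of_neg (by omega)]; omega
        simp [pvPrune, hk, pvLoopA, habs]

theorem pvRunB_eq (k : Int) : ∀ (rest : List String) (m : Int) (qp qt : List Int) (c : Int),
    (qp = [] ∨ qt = []) → (∀ x ∈ qp, x < m) → (∀ x ∈ qt, x < m) →
    pvRunB k rest m qp qt c = pvLoopA k (qp ++ pvPol rest m) (qt ++ pvThv rest m) c := by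
  intro rest
  induction rest with
  | nil =>
      intro m qp qt c hor _ _
      rcases hor with h | h <;> subst h <;>
        simp [pvRunB, pvPol, pvThv, pvLoopA_nil_left, pvLoopA_nil_right]
  | cons s rest ih =>
      intro m qp qt c hor hqp hqt
      have hlt1 : ∀ x ∈ qp, x < m + 1 := fun x hx => by have := hqp x hx; omega
      have hlt2 : ∀ x ∈ qt, x < m + 1 := fun x hx => by have := hqt x hx; omega
      by_cases hs : s = "P"
      · -- police at index m
        rcases hor with hqpe | hqte
        · -- qp = []
          subst hqpe
          rw [show ([] : List Int) ++ pvPol (s :: rest) m = m :: pvPol rest (m+1) by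
                simp [pvPol, hs]]
          rw [show qt ++ pvThv (s :: rest) m = qt ++ pvThv rest (m+1) by simp [pvThv, hs]]
          rw [pvLoopA_thiefQueue k m qt hqt]
          simp only [pvRunB, if_pos hs]
          cases hpr : pvPrune k m qt with
          | nil =>
              rw [ih (m+1) ([] ++ [m]) [] c (Or.inr rfl)
                    (by intro x hx; simp at hx; omega) (by intro x hx; simp at hx)]
              simp
          | cons t qt' =>
              dsimp only
              rw [ih (m+1) [] qt' (c+1) (Or.inl rfl) (by intro x hx; simp at hx)
                    (fun x hx => hlt2 x (pvPrune_mem k m qt x (hpr ▸ List.mem_cons_of_mem _ hx)))]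
              simp
        · -- qt = []
          subst hqte
          simp only [pvRunB, if_pos hs, pvPrune]
          rw [ih (m+1) (qp ++ [m]) [] c (Or.inr rfl)
                (by intro x hx; simp at hx; rcases hx with hx | hx
                    · have := hqp x hx; omega
                    · omega)
                (by intro x hx; simp at hx)]
          simp [pvPol, pvThv, hs]
      · -- thief at index m
        rcases hor with hqpe | hqte
        · -- qp = []
          subst hqpe
          simp only [pvRunB, if_neg hs, pvPrune]
          rw [ih (m+1) [] (qt ++ [m]) c (Or.inl rfl) (by intro x hx; simp at hx)
                (by intro x hx; simp at hx; rcases hx with hx | hx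
                    · have := hqt x hx; omega
                    · omega)]
          simp [pvPol, pvThv, hs]
        · -- qt = []
          subst hqte
          rw [show ([] : List Int) ++ pvThv (s :: rest) m = m :: pvThv rest (m+1) by
                simp [pvThv, hs]]
          rw [show qp ++ pvPol (s :: rest) m = qp ++ pvPol rest (m+1) by simp [pvPol, hs]]
          rw [pvLoopA_policeQueue k m qp hqp]
          simp only [pvRunB, if_neg hs]
          cases hpr : pvPrune k m qp with
          | nil =>
              rw [ih (m+1) [] ([] ++ [m]) c (Or.inl rfl) (by intro x hx; simp at hx)
                    (by intro x hx; simp at hx; omega)]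
              simp
          | cons p qp' =>
              dsimp only
              rw [ih (m+1) qp' [] (c+1) (Or.inr rfl)
                    (fun x hx => hlt1 x (pvPrune_mem k m qp x (hpr ▸ List.mem_cons_of_mem _ hx)))
                    (by intro x hx; simp at hx)]
              simp

-- ===== VERDICT (by name: the statement is the Claim_ definition above) =====
theorem max_thieves_caught_spec : Claim_equal_max_thieves_caught := by
  intro arr k _
  unfold Spec_max_thieves_caught max_thieves_caught max_thieves_caught_alt
  rw [pvPartLoop_eq arr 0 [] []]
  rw [pvRunB_eq k arr 0 [] [] 0 (Or.inl rfl) (by simp) (by simp)]
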